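-- pv_equiv track=rewrite | github.com/ankurelexbit/predictorV2 | modeling_pipeline/build_in_game_dataset.py | reconstruct_timeline
-- ===== SOURCE A (Python) =====
-- def reconstruct_timeline(match_data):
--     """Reconstruct match state at each minute from events"""
--
--     events = match_data.get('events', [])
--     participants = match_data.get('participants', [])
--
--     if len(participants) < 2:
--         return None
--
--     home_team_id = participants[0]['id']
--     away_team_id = participants[1]['id']
--
--     # Initialize timeline for 95 minutes (including injury time)
--     timeline = []
--
--     for minute in range(96):
--         state = {
--             'minute': minute,
--             'home_goals': 0,
--             'away_goals': 0,
--             'home_red_cards': 0,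
--             'away_red_cards': 0,
--             'home_yellow_cards': 0,
--             'away_yellow_cards': 0,
--             'total_goals': 0
--         }
--
--         # Count events up to this minute
--         for event in events:
--             event_minute = event.get('minute', 0)
--
--             # Only count events that happened before or at this minute
--             if event_minute <= minute:
--                 participant_id = event.get('participant_id')
--                 type_id = event.get('type_id')
--
--                 # Goals (type_id = 14)
--                 if type_id == 14:
--                     if participant_id == home_team_id:
--                         state['home_goals'] += 1
--                     elif participant_id == away_team_id:
--                         state['away_goals'] += 1
--                     state['total_goals'] += 1
--
--                 # Red cards (type_id = 18)
--                 elif type_id == 18: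
--                     if participant_id == home_team_id:
--                         state['home_red_cards'] += 1
--                     elif participant_id == away_team_id:
--                         state['away_red_cards'] += 1
--
--                 # Yellow cards (type_id = 17)
--                 elif type_id == 17:
--                     if participant_id == home_team_id:
--                         state['home_yellow_cards'] += 1
--                     elif participant_id == away_team_id:
--                         state['away_yellow_cards'] += 1
--
--         timeline.append(state)
--
--     return timeline
-- ===== SOURCE B (Python) =====
-- def _fields(event, home_team_id, away_team_id):
--     """0-based indices of the counters this event increments
--     (0 home_goals, 1 away_goals, 2 home_red, 3 away_red, 4 home_yellow, 5 away_yellow, 6 total_goals)."""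
--     pid = event.get('participant_id')
--     type_id = event.get('type_id')
--     fs = []
--     if type_id == 14:
--         if pid == home_team_id:
--             fs.append(0)
--         elif pid == away_team_id:
--             fs.append(1)
--         fs.append(6)
--     elif type_id == 18:
--         if pid == home_team_id:
--             fs.append(2)
--         elif pid == away_team_id:
--             fs.append(3)
--     elif type_id == 17:
--         if pid == home_team_id:
--             fs.append(4)
--         elif pid == away_team_id:
--             fs.append(5)
--     return fs
--
--
-- def reconstruct_timeline(match_data):
--     """Reconstruct match state at each minute from events.
--
--     One pass over the events builds a 7x96 histogram of per-minute increments;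
--     per-field prefix sums then give every minute's cumulative counters."""
--     events = match_data.get('events', [])
--     participants = match_data.get('participants', [])
--
--     if len(participants) < 2:
--         return None
--
--     home_team_id = participants[0]['id']
--     away_team_id = participants[1]['id']
--
--     # histogram: hist[f][m] = number of field-f increments at minute m (clamped to 0..95)
--     hist = [[0] * 96 for _ in range(7)]
--     for event in events:
--         m = event.get('minute', 0)
--         if m <= 95:
--             for f in _fields(event, home_team_id, away_team_id):
--                 hist[f][max(m, 0)] += 1
--
--     # per-field running prefix sums: cols[f][m] = cumulative count of field f up to minute m
--     cols = []
--     for h in hist: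
--         total = 0
--         col = []
--         for c in h:
--             total += c
--             col.append(total)
--         cols.append(col)
--
--     names = ['home_goals', 'away_goals', 'home_red_cards', 'away_red_cards',
--              'home_yellow_cards', 'away_yellow_cards', 'total_goals']
--     return [dict([('minute', m)] + [(names[f], cols[f][m]) for f in range(7)])
--             for m in range(96)]
-- ===== Notes on version B (the rewrite author's own statement) =====
-- stated objective: alternative
-- what changed: A rescans the whole event list once per each of the 96 minutes with a 7-branch counter update; B classifies each event once into the list of counter indices it increments, fills a 7x96 per-minute histogram in a single pass, and obtains every minute's state from per-field prefix sums.
import Mathlib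
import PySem

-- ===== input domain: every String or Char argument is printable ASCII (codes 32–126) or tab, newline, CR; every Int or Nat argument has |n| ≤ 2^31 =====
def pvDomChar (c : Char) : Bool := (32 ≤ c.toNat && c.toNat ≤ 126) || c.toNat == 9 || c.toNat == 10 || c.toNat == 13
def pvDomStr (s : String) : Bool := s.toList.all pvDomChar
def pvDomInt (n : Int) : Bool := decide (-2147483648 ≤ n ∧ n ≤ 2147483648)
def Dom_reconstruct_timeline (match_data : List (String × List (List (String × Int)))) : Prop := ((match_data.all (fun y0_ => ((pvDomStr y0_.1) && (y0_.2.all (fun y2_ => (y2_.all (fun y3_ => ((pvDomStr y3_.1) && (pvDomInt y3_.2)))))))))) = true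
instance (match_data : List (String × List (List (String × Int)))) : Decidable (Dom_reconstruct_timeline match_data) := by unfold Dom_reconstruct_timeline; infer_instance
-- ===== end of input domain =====

-- B replaces A's 96 full rescans of the event list (7-branch counter update per scan) by ONE
-- classification of each event into the counter indices it increments, a 7x96 per-minute
-- histogram filled in a single pass, and per-field prefix sums (objective: alternative).

-- The 7 counters (home_goals, away_goals, home_red, away_red, home_yellow, away_yellow, total_goals)
abbrev PVS : Type := Int × Int × Int × Int × Int × Int × Int

-- ===== PORT A =====
-- one state dict in A's fixed key-insertion order
def pvRow (minute : Int) : PVS → List (String × Int)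
  | (hg, ag, hr, ar, hy, ay, tg) =>
    [("minute", minute), ("home_goals", hg), ("away_goals", ag), ("home_red_cards", hr),
     ("away_red_cards", ar), ("home_yellow_cards", hy), ("away_yellow_cards", ay),
     ("total_goals", tg)]

-- A's inner `for event in events` body (the state dict with fixed keys is carried as the 7-tuple PVS)
def pvStepA (home away minute : Int) (s : PVS) (event : List (String × Int)) : PVS :=
  let em := (PySem.Dict.mk event).getD "minute" 0
  if em ≤ minute then
    let pid := (PySem.Dict.mk event).get? "participant_id"
    let tid := (PySem.Dict.mk event).get? "type_id"
    match s with
    | (hg, ag, hr, ar, hy, ay, tg) =>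
      if tid = some 14 then
        if pid = some home then (hg + 1, ag, hr, ar, hy, ay, tg + 1)
        else if pid = some away then (hg, ag + 1, hr, ar, hy, ay, tg + 1)
        else (hg, ag, hr, ar, hy, ay, tg + 1)
      else if tid = some 18 then
        if pid = some home then (hg, ag, hr + 1, ar, hy, ay, tg)
        else if pid = some away then (hg, ag, hr, ar + 1, hy, ay, tg)
        else s
      else if tid = some 17 then
        if pid = some home then (hg, ag, hr, ar, hy + 1, ay, tg)
        else if pid = some away then (hg, ag, hr, ar, hy, ay + 1, tg)
        else s
      else s
  else s

def reconstruct_timeline (match_data : List (String × List (List (String × Int)))) : Option (List (List (String × Int))) :=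
  let d := PySem.Dict.mk match_data
  let events := d.getD "events" []
  let participants := d.getD "participants" []
  if PySem.List.len participants < 2 then none
  else
    -- participants[0]['id'] / participants[1]['id']: in range by the length test; Pre_ guarantees the 'id' key
    let home := (PySem.Dict.mk (PySem.List.pyGetD participants 0 [])).getD "id" 0
    let away := (PySem.Dict.mk (PySem.List.pyGetD participants 1 [])).getD "id" 0
    some ((PySem.List.pyRange 0 96).map (fun minute =>
      pvRow minute (events.foldl (pvStepA home away minute) (0, 0, 0, 0, 0, 0, 0))))

-- ===== PORT B =====
-- B's `_fields`: 0-based indices of the counters one event increments (list built by appends)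
def pvFields (home_team_id away_team_id : Int) (event : List (String × Int)) : List Nat :=
  let pid := (PySem.Dict.mk event).get? "participant_id"
  let tid := (PySem.Dict.mk event).get? "type_id"
  if tid = some 14 then
    (if pid = some home_team_id then [0]
     else if pid = some away_team_id then [1] else []) ++ [6]
  else if tid = some 18 then
    if pid = some home_team_id then [2]
    else if pid = some away_team_id then [3] else []
  else if tid = some 17 then
    if pid = some home_team_id then [4]
    else if pid = some away_team_id then [5] else []
  else []

-- `hist[f][m] += 1`
def pvBump (m : Nat) (hist : List (List Int)) (f : Nat) : List (List Int) :=
  hist.modify f (fun h => h.modify m (· + 1))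

-- B's histogram loop body: events after minute 95 are dropped, negatives clamp to bucket 0
def pvHistStep (home away : Int) (hist : List (List Int)) (event : List (String × Int)) : List (List Int) :=
  let m := (PySem.Dict.mk event).getD "minute" 0
  if m ≤ 95 then (pvFields home away event).foldl (pvBump (max m 0).toNat) hist
  else hist

-- B's running-total loop over one histogram row
def pvPrefix (h : List Int) : List Int :=
  (h.foldl (fun (acc : Int × List Int) c => (acc.1 + c, acc.2 ++ [acc.1 + c])) (0, [])).2

def pvNames : List String :=
  ["home_goals", "away_goals", "home_red_cards", "away_red_cards",
   "home_yellow_cards", "away_yellow_cards", "total_goals"]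

def reconstruct_timeline_alt (match_data : List (String × List (List (String × Int)))) : Option (List (List (String × Int))) :=
  let d := PySem.Dict.mk match_data
  let events := d.getD "events" []
  let participants := d.getD "participants" []
  if PySem.List.len participants < 2 then none
  else
    let home := (PySem.Dict.mk (PySem.List.pyGetD participants 0 [])).getD "id" 0
    let away := (PySem.Dict.mk (PySem.List.pyGetD participants 1 [])).getD "id" 0
    let hist := events.foldl (pvHistStep home away) (List.replicate 7 (List.replicate 96 (0 : Int)))
    let cols := hist.map pvPrefix
    -- the final dict() is over 8 distinct literal keys, so it IS its assoc list;
    -- cols[f][m] is always in range, so getD is exact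
    some ((PySem.List.pyRange 0 96).map (fun m =>
      ("minute", m) :: (List.range 7).map (fun f =>
        (pvNames.getD f "", (cols.getD f []).getD m.toNat 0))))

-- ===== PRECONDITION & SPEC =====
-- Pre_ excludes exactly the inputs where A (and B) raise KeyError: at least two participants
-- but the first or second participant dict has no 'id' key.
def Pre_reconstruct_timeline (match_data : List (String × List (List (String × Int)))) : Prop :=
  let ps := (PySem.Dict.mk match_data).getD "participants" []
  2 ≤ ps.length →
    ((PySem.Dict.mk (ps.getD 0 [])).contains "id" = true ∧
     (PySem.Dict.mk (ps.getD 1 [])).contains "id" = true)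
instance (match_data : List (String × List (List (String × Int)))) : Decidable (Pre_reconstruct_timeline match_data) := by unfold Pre_reconstruct_timeline; infer_instance

def pvWitness_reconstruct_timeline : (List (String × List (List (String × Int)))) :=
  [("participants", [[("id", 1)], [("id", 2)]]),
   ("events", [[("minute", 10), ("type_id", 14), ("participant_id", 1)]])]

def Spec_reconstruct_timeline (match_data : List (String × List (List (String × Int)))) (out : Option (List (List (String × Int)))) : Prop := out = reconstruct_timeline_alt match_data
instance (match_data : List (String × List (List (String × Int)))) (out : Option (List (List (String × Int)))) : Decidable (Spec_reconstruct_timeline match_data out) := by unfold Spec_reconstruct_timeline; infer_instance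

-- ===== CLAIM (what is proved, stated in full; the proofs are below) =====
def Claim_equal_reconstruct_timeline : Prop := ∀ (match_data : List (String × List (List (String × Int)))), Dom_reconstruct_timeline match_data → Pre_reconstruct_timeline match_data → Spec_reconstruct_timeline match_data (reconstruct_timeline match_data)

-- ===== LEMMAS AND PROOFS =====

-- the contribution of one event to A's counters at a given minute
def pvCondDelta (home away minute : Int) (event : List (String × Int)) : PVS :=
  let em := (PySem.Dict.mk event).getD "minute" 0
  if em ≤ minute then
    let pid := (PySem.Dict.mk event).get? "participant_id"
    let tid := (PySem.Dict.mk event).get? "type_id"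
    if tid = some 14 then
      if pid = some home then (1, 0, 0, 0, 0, 0, 1)
      else if pid = some away then (0, 1, 0, 0, 0, 0, 1)
      else (0, 0, 0, 0, 0, 0, 1)
    else if tid = some 18 then
      if pid = some home then (0, 0, 1, 0, 0, 0, 0)
      else if pid = some away then (0, 0, 0, 1, 0, 0, 0)
      else 0
    else if tid = some 17 then
      if pid = some home then (0, 0, 0, 0, 1, 0, 0)
      else if pid = some away then (0, 0, 0, 0, 0, 1, 0)
      else 0
    else 0
  else 0

theorem pvStepA_eq (home away minute : Int) (s : PVS) (e : List (String × Int)) :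
    pvStepA home away minute s e = s + pvCondDelta home away minute e := by
  obtain ⟨a1, a2, a3, a4, a5, a6, a7⟩ := s
  simp only [pvStepA, pvCondDelta]
  split_ifs <;> simp

theorem pvFoldA_eq (home away minute : Int) (events : List (List (String × Int))) (s : PVS) :
    events.foldl (pvStepA home away minute) s = s + (events.map (pvCondDelta home away minute)).sum := by
  induction events generalizing s with
  | nil => simp
  | cons e es ih => simp [List.foldl_cons, ih, pvStepA_eq, add_assoc]

-- projection of the 7-tuple onto counter index f (0 for f ≥ 7)
def pvProj (f : Nat) (s : PVS) : Int :=
  [s.1, s.2.1, s.2.2.1, s.2.2.2.1, s.2.2.2.2.1, s.2.2.2.2.2.1, s.2.2.2.2.2.2].getD f 0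

theorem pvProj_add (f : Nat) (a b : PVS) : pvProj f (a + b) = pvProj f a + pvProj f b := by
  obtain ⟨a1, a2, a3, a4, a5, a6, a7⟩ := a
  obtain ⟨b1, b2, b3, b4, b5, b6, b7⟩ := b
  rcases f with _|_|_|_|_|_|_|f <;> simp [pvProj, Prod.mk_add_mk]

theorem pvProj_sum (f : Nat) (l : List PVS) : pvProj f l.sum = (l.map (pvProj f)).sum := by
  induction l with
  | nil => rcases f with _|_|_|_|_|_|_|f <;> simp [pvProj]
  | cons x xs ih => simp [List.sum_cons, pvProj_add, ih]

-- one event's contribution to counter f at minute n, as B counts it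
def pvEvCnt (home away n : Int) (f : Nat) (event : List (String × Int)) : Int :=
  if (PySem.Dict.mk event).getD "minute" 0 ≤ n then ((pvFields home away event).count f : Int) else 0

theorem pvBridge (home away n : Int) (f : Nat) (e : List (String × Int)) :
    pvProj f (pvCondDelta home away n e) = pvEvCnt home away n f e := by
  simp only [pvCondDelta, pvEvCnt, pvFields]
  split_ifs <;> rcases f with _|_|_|_|_|_|_|f <;> simp [pvProj]

theorem pvFields_lt (home away : Int) (e : List (String × Int)) :
    ∀ g ∈ pvFields home away e, g < 7 := by
  simp only [pvFields]
  split_ifs <;> simp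

-- the histogram shape
def pvSh (hist : List (List Int)) : Prop :=
  hist.length = 7 ∧ ∀ h ∈ hist, h.length = 96

-- cumulative count: sum of histogram row f up to minute n
def pvMu (f n : Nat) (hist : List (List Int)) : Int :=
  ((hist.getD f []).take (n + 1)).sum

theorem pvSum_take_modify (l : List Int) (i : Nat) (hi : i < l.length) (n : Nat) :
    ((l.modify i (· + 1)).take n).sum = (l.take n).sum + if i < n then 1 else 0 := by
  induction l generalizing i n with
  | nil => simp at hi
  | cons x xs ih =>
    cases n with
    | zero => simp
    | succ n =>
      rw [List.modify_cons]
      cases i with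
      | zero => simp [add_assoc, add_comm (1 : Int)]
      | succ i =>
        simp only [Nat.succ_ne_zero, Nat.add_sub_cancel, List.take_succ_cons,
          List.sum_cons, reduceIte]
        rw [ih i (by simpa using hi) n]
        simp [add_assoc]

theorem pvSh_bump (m : Nat) (hist : List (List Int)) (g : Nat) (hs : pvSh hist) :
    pvSh (pvBump m hist g) := by
  obtain ⟨h1, h2⟩ := hs
  refine ⟨by simpa [pvBump] using h1, ?_⟩
  intro h hh
  rw [List.mem_iff_getElem?] at hh
  obtain ⟨i, hi⟩ := hh
  rw [pvBump, List.getElem?_modify] at hi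
  cases hl : hist[i]? with
  | none => rw [hl] at hi; simp at hi
  | some h' =>
    have hm := h2 _ (List.mem_of_getElem? hl)
    rw [hl] at hi
    simp at hi
    split_ifs at hi <;> rw [← hi] <;> simp [hm]

theorem pvMu_bump (f n m g : Nat) (hist : List (List Int)) (hs : pvSh hist)
    (hf : f < 7) (hg : g < 7) (hm : m < 96) :
    pvMu f n (pvBump m hist g) = pvMu f n hist + if g = f ∧ m ≤ n then 1 else 0 := by
  obtain ⟨h1, h2⟩ := hs
  have hgl : g < hist.length := by omega
  have hfl : f < hist.length := by omega
  by_cases hgf : g = f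
  · subst hgf
    have hget : (pvBump m hist g).getD g [] = (hist[g]).modify m (· + 1) := by
      simp [pvBump, List.getD, hgl]
    have hbase : hist.getD g [] = hist[g] := by simp [List.getD, hgl]
    rw [pvMu, pvMu, hget, hbase,
      pvSum_take_modify _ _ (by rw [h2 _ (List.getElem_mem hgl)]; omega)]
    congr 1
    simp only [true_and]
    split_ifs <;> simp_all
  · have hget : (pvBump m hist g).getD f [] = hist.getD f [] := by
      simp [pvBump, List.getD, hgf]
    rw [pvMu, pvMu, hget, if_neg (by tauto)]
    ring

theorem pvSh_bumps (m : Nat) (fs : List Nat) (hist : List (List Int)) (hs : pvSh hist) :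
    pvSh (fs.foldl (pvBump m) hist) := by
  induction fs generalizing hist with
  | nil => simpa
  | cons g gs ih => exact ih _ (pvSh_bump m hist g hs)

theorem pvMu_bumps (f n m : Nat) (fs : List Nat) (hist : List (List Int)) (hs : pvSh hist)
    (hf : f < 7) (hgs : ∀ g ∈ fs, g < 7) (hm : m < 96) :
    pvMu f n (fs.foldl (pvBump m) hist)
      = pvMu f n hist + if m ≤ n then (fs.count f : Int) else 0 := by
  induction fs generalizing hist with
  | nil => simp
  | cons g gs ih =>
    rw [List.foldl_cons, ih _ (pvSh_bump m hist g hs) (fun x hx => hgs x (by simp [hx])),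
      pvMu_bump f n m g hist hs hf (hgs g (by simp)) hm, List.count_cons]
    split_ifs with h1 h2 <;> push_cast <;> simp_all
    omega

theorem pvSh_histStep (home away : Int) (hist : List (List Int)) (e : List (String × Int))
    (hs : pvSh hist) : pvSh (pvHistStep home away hist e) := by
  simp only [pvHistStep]
  split_ifs with h
  · exact pvSh_bumps _ _ _ hs
  · exact hs

theorem pvMu_histStep (home away : Int) (f n : Nat) (hist : List (List Int))
    (e : List (String × Int)) (hs : pvSh hist) (hf : f < 7) (hn : n ≤ 95) :
    pvMu f n (pvHistStep home away hist e)
      = pvMu f n hist + pvEvCnt home away (n : Int) f e := by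
  simp only [pvHistStep, pvEvCnt]
  set em := (PySem.Dict.mk e).getD "minute" 0 with hem
  by_cases h95 : em ≤ 95
  · rw [if_pos h95,
      pvMu_bumps f n _ _ hist hs hf (pvFields_lt home away e) (by omega)]
    congr 1
    have : (max em 0).toNat ≤ n ↔ em ≤ (n : Int) := by omega
    simp only [this]
  · rw [if_neg h95, if_neg (by omega)]
    ring

theorem pvSh_histFold (home away : Int) (events : List (List (String × Int)))
    (hist : List (List Int)) (hs : pvSh hist) :
    pvSh (events.foldl (pvHistStep home away) hist) := by
  induction events generalizing hist with
  | nil => simpa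
  | cons e es ih => exact ih _ (pvSh_histStep home away hist e hs)

theorem pvMu_histFold (home away : Int) (f n : Nat) (events : List (List (String × Int)))
    (hist : List (List Int)) (hs : pvSh hist) (hf : f < 7) (hn : n ≤ 95) :
    pvMu f n (events.foldl (pvHistStep home away) hist)
      = pvMu f n hist + (events.map (pvEvCnt home away (n : Int) f)).sum := by
  induction events generalizing hist with
  | nil => simp
  | cons e es ih =>
    rw [List.foldl_cons, ih _ (pvSh_histStep home away hist e hs), List.map_cons,
      List.sum_cons, pvMu_histStep home away f n hist e hs hf hn]
    ring

theorem pvSh_init : pvSh (List.replicate 7 (List.replicate 96 (0 : Int))) := by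
  constructor
  · simp
  · intro h hh
    simp_all [List.eq_of_mem_replicate hh]

theorem pvMu_init (f n : Nat) (hf : f < 7) :
    pvMu f n (List.replicate 7 (List.replicate 96 (0 : Int))) = 0 := by
  rw [pvMu, List.getD_replicate _ hf, List.take_replicate, List.sum_replicate]
  simp

-- the running-total loop produces exactly the prefix sums
theorem pvPrefix_eq (h : List Int) :
    h.foldl (fun (acc : Int × List Int) c => (acc.1 + c, acc.2 ++ [acc.1 + c])) (0, [])
      = (h.sum, (List.range h.length).map (fun k => (h.take (k + 1)).sum)) := by
  induction h using List.reverseRecOn with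
  | nil => simp
  | append_singleton h x ih =>
    rw [List.foldl_append, ih]
    simp only [List.foldl_cons, List.foldl_nil, List.length_append, List.length_singleton,
      List.range_succ, List.map_append, List.map_cons, List.map_nil]
    rw [Prod.mk.injEq]
    refine ⟨by simp, ?_⟩
    congr 1
    · apply List.map_congr_left
      intro k hk
      simp only [List.mem_range] at hk
      rw [List.take_append_of_le_length (by omega)]
    · rw [List.take_of_length_le (by simp)]
      simp

theorem pvPrefix_getD (h : List Int) (n : Nat) (hn : n < h.length) :
    (pvPrefix h).getD n 0 = (h.take (n + 1)).sum := by
  rw [pvPrefix, pvPrefix_eq]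
  rw [List.getD_eq_getElem _ _ (by simpa using hn)]
  rw [List.getElem_map, List.getElem_range]

-- ===== VERDICT (by name: the statement is the Claim_ definition above) =====
set_option maxHeartbeats 1000000 in
theorem reconstruct_timeline_spec : Claim_equal_reconstruct_timeline := by
  intro match_data _ _
  show reconstruct_timeline match_data = reconstruct_timeline_alt match_data
  simp only [reconstruct_timeline, reconstruct_timeline_alt]
  set events := (PySem.Dict.mk match_data).getD "events" [] with hev
  set participants := (PySem.Dict.mk match_data).getD "participants" [] with hps
  set home := (PySem.Dict.mk (PySem.List.pyGetD participants 0 [])).getD "id" 0 with hh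
  set away := (PySem.Dict.mk (PySem.List.pyGetD participants 1 [])).getD "id" 0 with ha
  split_ifs with h
  · rfl
  · refine congrArg some ?_
    set hist := events.foldl (pvHistStep home away) (List.replicate 7 (List.replicate 96 (0 : Int))) with hhist
    have hsh : pvSh hist := pvSh_histFold home away events _ pvSh_init
    apply List.map_congr_left
    intro m hm
    rw [PySem.List.mem_pyRange_one] at hm
    -- the per-counter value: B's cols[f][m] = projection f of A's fold at minute m
    have key : ∀ f : Nat, f < 7 →
        (((hist.map pvPrefix).getD f []).getD m.toNat 0)
          = pvProj f (events.foldl (pvStepA home away m) (0, 0, 0, 0, 0, 0, 0)) := by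
      intro f hf
      obtain ⟨h1, h2⟩ := hsh
      have hfl : f < hist.length := by omega
      have hcol : (hist.map pvPrefix).getD f [] = pvPrefix (hist[f]) := by
        simp [List.getD, hfl]
      have hlen : (hist[f]).length = 96 := h2 _ (List.getElem_mem hfl)
      have hgetd : hist.getD f [] = hist[f] := by simp [List.getD, hfl]
      rw [hcol, pvPrefix_getD _ _ (by omega), pvFoldA_eq, pvProj_add, pvProj_sum,
        ← hgetd, show ((hist.getD f []).take (m.toNat + 1)).sum = pvMu f m.toNat hist from rfl,
        hhist, pvMu_histFold home away f m.toNat events _ pvSh_init hf (by omega),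
        pvMu_init f m.toNat hf]
      have hcast : ((m.toNat : Nat) : Int) = m := by omega
      rw [hcast]
      have hfun : pvEvCnt home away m f = fun e => pvProj f (pvCondDelta home away m e) :=
        funext fun e => (pvBridge home away m f e).symm
      rw [hfun]
      simp only [List.map_map, Function.comp_def]
      rcases f with _|_|_|_|_|_|_|f <;> simp [pvProj]
    have hr7 : List.range 7 = [0, 1, 2, 3, 4, 5, 6] := by rfl
    rw [hr7]
    simp only [List.map_cons, List.map_nil]
    rw [key 0 (by omega), key 1 (by omega), key 2 (by omega), key 3 (by omega),
      key 4 (by omega), key 5 (by omega), key 6 (by omega)]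
    obtain ⟨s1, s2, s3, s4, s5, s6, s7⟩ := events.foldl (pvStepA home away m) ((0, 0, 0, 0, 0, 0, 0) : PVS)
    simp [pvRow, pvProj, pvNames]
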